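-- pv_equiv track=rewrite | github.com/eachitaev/python | task3/task3.py | arg_to_rascV
-- ===== SOURCE A (Python) =====
-- def arg_to_rascV(findv):
--     temp = []
--     num = ''
--     tempfindv = findv
--     tempfindv = tempfindv[tempfindv.rfind('-'):]
--     for char in tempfindv:
--         if char.isdigit():
--             num = num + char
--         else:
--             if num != '':
--                 temp.append(int(num))
--                 num = ''
--     if num != '':
--         temp.append(int(num))
--     return temp
-- ===== SOURCE B (Python) =====
-- def arg_to_rascV(findv):
--     sub = findv[findv.rfind('-'):]
--     res = []
--     i, n = 0, len(sub)
--     while i < n: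
--         if sub[i].isdigit():
--             j = i
--             while j < n and sub[j].isdigit():
--                 j += 1
--             res.append(int(sub[i:j]))
--             i = j
--         else:
--             i += 1
--     return res
-- ===== Notes on version B (the rewrite author's own statement) =====
-- stated objective: alternative
-- what changed: B replaces A's char-by-char accumulator buffer with a two-pointer index scan that finds each maximal digit run, slices it out and converts it to int at once.
import Mathlib
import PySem

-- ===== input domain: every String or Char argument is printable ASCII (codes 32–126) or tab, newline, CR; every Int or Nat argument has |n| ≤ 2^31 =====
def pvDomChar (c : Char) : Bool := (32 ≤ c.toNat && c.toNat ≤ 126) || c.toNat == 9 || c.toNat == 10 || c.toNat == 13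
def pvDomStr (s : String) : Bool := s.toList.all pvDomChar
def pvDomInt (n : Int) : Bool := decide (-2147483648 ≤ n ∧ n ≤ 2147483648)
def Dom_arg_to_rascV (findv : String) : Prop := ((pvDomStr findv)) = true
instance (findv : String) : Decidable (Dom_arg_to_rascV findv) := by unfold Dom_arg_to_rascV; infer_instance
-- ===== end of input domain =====

-- B replaces A's char-by-char accumulator buffer with a two-pointer index scan over
-- maximal digit runs; both take the substring from the last '-' exactly as the Python does.

-- ===== PORT A =====
-- loop body of A's for-loop; state = (temp, num) with num a List Char
def pvStep (s : List Int × List Char) (c : Char) : List Int × List Char :=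
  if PySem.Chars.isdigit c then (s.1, s.2 ++ [c])
  else if s.2 ≠ [] then (s.1 ++ [(PySem.Int.ofChars? s.2).getD 0], []) else s
  -- int(num): num is always nonempty digits here, so ofChars? is some and getD never fires

-- trailing 'if num != '': temp.append(int(num))'
def pvFin (s : List Int × List Char) : List Int :=
  if s.2 ≠ [] then s.1 ++ [(PySem.Int.ofChars? s.2).getD 0] else s.1

def arg_to_rascV (findv : String) : List Int :=
  let tempfindv := PySem.Str.slice findv (some (PySem.Str.rfind findv "-")) none
  pvFin (tempfindv.toList.foldl pvStep ([], []))

-- ===== PORT B =====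
-- inner while: 'while j < n and sub[j].isdigit(): j += 1'
def pvScan (sub : List Char) (j : Nat) : Nat :=
  if h : j < sub.length then
    if PySem.Chars.isdigit sub[j] then pvScan sub (j + 1) else j
  else j
termination_by sub.length - j

theorem le_pvScan (sub : List Char) (j : Nat) : j ≤ pvScan sub j := by
  rw [pvScan]
  split
  · split
    · exact Nat.le_trans (Nat.le_succ j) (le_pvScan sub (j + 1))
    · exact Nat.le_refl j
  · exact Nat.le_refl j
termination_by sub.length - j

theorem pvScan_gt (sub : List Char) (i : Nat) (h : i < sub.length)
    (hd : PySem.Chars.isdigit sub[i] = true) : i < pvScan sub i := by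
  rw [pvScan, dif_pos h, if_pos hd]
  exact Nat.lt_of_lt_of_le (Nat.lt_succ_self i) (le_pvScan sub (i + 1))

-- outer while loop of B
def pvOuter (sub : List Char) (i : Nat) (res : List Int) : List Int :=
  if h : i < sub.length then
    if hd : PySem.Chars.isdigit sub[i] then
      pvOuter sub (pvScan sub i)
        (res ++ [(PySem.Int.ofChars?
          (PySem.List.slice sub (some (i : Int)) (some ((pvScan sub i : Nat) : Int)))).getD 0])
    else pvOuter sub (i + 1) res
  else res
termination_by sub.length - i
decreasing_by
  · have := pvScan_gt sub i h hd
    omega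
  · omega

def arg_to_rascV_alt (findv : String) : List Int :=
  let sub := (PySem.Str.slice findv (some (PySem.Str.rfind findv "-")) none).toList
  pvOuter sub 0 []

-- ===== PRECONDITION & SPEC =====
def Spec_arg_to_rascV (findv : String) (out : List Int) : Prop := out = arg_to_rascV_alt findv
instance (findv : String) (out : List Int) : Decidable (Spec_arg_to_rascV findv out) := by unfold Spec_arg_to_rascV; infer_instance

-- ===== CLAIM (what is proved, stated in full; the proofs are below) =====
def Claim_equal_arg_to_rascV : Prop := ∀ (findv : String), Dom_arg_to_rascV findv → Spec_arg_to_rascV findv (arg_to_rascV findv)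

-- ===== LEMMAS AND PROOFS =====

theorem pvScan_le (sub : List Char) (i : Nat) (hi : i ≤ sub.length) :
    pvScan sub i ≤ sub.length := by
  rw [pvScan]
  split
  · split
    · exact pvScan_le sub (i + 1) (by omega)
    · exact hi
  · exact hi
termination_by sub.length - i

theorem pvScan_stop (sub : List Char) (i : Nat) (hlt : pvScan sub i < sub.length) :
    PySem.Chars.isdigit (sub[pvScan sub i]'hlt) = false := by
  by_cases h : i < sub.length
  · by_cases hd : PySem.Chars.isdigit sub[i] = true
    · have e : pvScan sub i = pvScan sub (i + 1) := by
        conv_lhs => rw [pvScan]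
        rw [dif_pos h, if_pos hd]
      have hlt' : pvScan sub (i + 1) < sub.length := e ▸ hlt
      have := pvScan_stop sub (i + 1) hlt'
      simp only [e]
      exact this
    · have e : pvScan sub i = i := by
        conv_lhs => rw [pvScan]
        rw [dif_pos h, if_neg hd]
      simp only [e]
      exact Bool.eq_false_iff.mpr (by simpa using hd)
  · have e : pvScan sub i = i := by
      conv_lhs => rw [pvScan]
      rw [dif_neg h]
    omega
termination_by sub.length - i
decreasing_by omega

-- digit-run lemma: A's fold over a maximal digit run just appends the run to num
theorem pvRun (sub : List Char) (i : Nat) (acc : List Char) (res : List Int) :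
    List.foldl pvStep (res, acc) (sub.drop i) =
      List.foldl pvStep (res, acc ++ (sub.drop i).take (pvScan sub i - i))
        (sub.drop (pvScan sub i)) := by
  by_cases h : i < sub.length
  · by_cases hd : PySem.Chars.isdigit sub[i] = true
    · have e : pvScan sub i = pvScan sub (i + 1) := by
        conv_lhs => rw [pvScan]
        rw [dif_pos h, if_pos hd]
      have hdrop : sub.drop i = sub[i] :: sub.drop (i + 1) :=
        List.drop_eq_getElem_cons h
      have hstep : pvStep (res, acc) sub[i] = (res, acc ++ [sub[i]]) := by
        simp [pvStep, hd]
      have hge : i + 1 ≤ pvScan sub (i + 1) := le_pvScan sub (i + 1)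
      rw [hdrop, List.foldl_cons, hstep, pvRun sub (i + 1) (acc ++ [sub[i]]) res, e]
      congr 2
      have htake : (sub.drop i).take (pvScan sub (i + 1) - i)
          = sub[i] :: (sub.drop (i + 1)).take (pvScan sub (i + 1) - (i + 1)) := by
        rw [hdrop]
        have : pvScan sub (i + 1) - i = (pvScan sub (i + 1) - (i + 1)) + 1 := by omega
        rw [this, List.take_succ_cons]
      rw [← hdrop, htake, List.append_assoc]
      rfl
    · have e : pvScan sub i = i := by
        conv_lhs => rw [pvScan]
        rw [dif_pos h, if_neg hd]
      simp [e]
  · have e : pvScan sub i = i := by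
      conv_lhs => rw [pvScan]
      rw [dif_neg h]
    simp [e]
termination_by sub.length - i
decreasing_by omega

-- main invariant: A's fold-and-flush from position i equals B's outer loop from i
theorem pvMain (sub : List Char) (i : Nat) (res : List Int) (hi : i ≤ sub.length) :
    pvFin (List.foldl pvStep (res, ([] : List Char)) (sub.drop i)) = pvOuter sub i res := by
  by_cases h : i < sub.length
  · by_cases hd : PySem.Chars.isdigit sub[i] = true
    · have hj : i < pvScan sub i := pvScan_gt sub i h hd
      have hjle : pvScan sub i ≤ sub.length := pvScan_le sub i (by omega)
      set j := pvScan sub i with hjdef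
      have hrun : List.foldl pvStep (res, ([] : List Char)) (sub.drop i)
          = List.foldl pvStep (res, (sub.drop i).take (j - i)) (sub.drop j) := by
        have := pvRun sub i [] res
        simpa using this
      have hslice : PySem.List.slice sub (some (i : Int)) (some ((j : Nat) : Int))
          = (sub.drop i).take (j - i) := PySem.List.slice_natCast sub i j
      have hrne : (sub.drop i).take (j - i) ≠ [] := by
        have hlen : ((sub.drop i).take (j - i)).length = min (j - i) (sub.length - i) := by
          simp
        intro hcon
        rw [hcon] at hlen
        simp at hlen
        omega
      have houter : pvOuter sub i res
          = pvOuter sub j (res ++ [(PySem.Int.ofChars? ((sub.drop i).take (j - i))).getD 0]) := by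
        rw [pvOuter, dif_pos h, dif_pos hd, ← hjdef, hslice]
      rw [houter, hrun]
      by_cases hjlt : j < sub.length
      · have hstop : PySem.Chars.isdigit (sub[j]'hjlt) = false := pvScan_stop sub i hjlt
        have hdropj : sub.drop j = sub[j] :: sub.drop (j + 1) :=
          List.drop_eq_getElem_cons hjlt
        have hstep : pvStep (res, (sub.drop i).take (j - i)) sub[j]
            = (res ++ [(PySem.Int.ofChars? ((sub.drop i).take (j - i))).getD 0], []) := by
          simp [pvStep, hstop, hrne]
        rw [hdropj, List.foldl_cons, hstep,
          pvMain sub (j + 1) (res ++ [(PySem.Int.ofChars? ((sub.drop i).take (j - i))).getD 0]) (by omega)]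
        conv_rhs => rw [pvOuter, dif_pos hjlt, dif_neg (by simp [hstop])]
      · have hj' : j = sub.length := by omega
        rw [hj']
        simp only [List.drop_length, List.foldl_nil]
        rw [pvFin]
        rw [if_pos (by rw [← hj']; exact hrne)]
        rw [pvOuter, dif_neg (by omega)]
    · have hdrop : sub.drop i = sub[i] :: sub.drop (i + 1) :=
        List.drop_eq_getElem_cons h
      have hstep : pvStep (res, ([] : List Char)) sub[i] = (res, []) := by
        simp [pvStep, hd]
      rw [hdrop, List.foldl_cons, hstep, pvMain sub (i + 1) res (by omega)]
      conv_rhs => rw [pvOuter, dif_pos h, dif_neg (by simp [hd])]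
  · have : i = sub.length := by omega
    rw [this]
    simp only [List.drop_length, List.foldl_nil]
    rw [pvFin, if_neg (by simp), pvOuter, dif_neg (by omega)]
termination_by sub.length - i
decreasing_by all_goals omega

-- ===== VERDICT (by name: the statement is the Claim_ definition above) =====
theorem arg_to_rascV_spec : Claim_equal_arg_to_rascV := by
  intro findv _
  unfold Spec_arg_to_rascV arg_to_rascV arg_to_rascV_alt
  have := pvMain ((PySem.Str.slice findv (some (PySem.Str.rfind findv "-")) none).toList) 0 []
    (Nat.zero_le _)
  simpa using this
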